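-- pv_equiv track=rewrite | github.com/Nazar-kob/codewars_aome_task- | 5kyu/task83_5kyu.py | scramble
-- ===== SOURCE A (Python) =====
-- def scramble(s1, s2):
--     s1 = s1.lower()
--     s2 = s2.lower()
--     for i in s2:
--         if s2.count(i) <= s1.count(i):
--             pass
--         else:
--             return False
--     return True
-- ===== SOURCE B (Python) =====
-- def scramble(s1, s2):
--     counts = {}
--     for c in s1.lower():
--         counts[c] = counts.get(c, 0) + 1
--     for c in s2.lower():
--         n = counts.get(c, 0)
--         if n == 0:
--             return False
--         counts[c] = n - 1
--     return True
-- ===== Notes on version B (the rewrite author's own statement) =====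
-- stated objective: faster
-- what changed: Replaces A's repeated s1.count/s2.count scans per character with a dictionary of character counts of s1 built once and decremented while scanning s2, turning O(n*m) rescanning into two linear passes.
import Mathlib
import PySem

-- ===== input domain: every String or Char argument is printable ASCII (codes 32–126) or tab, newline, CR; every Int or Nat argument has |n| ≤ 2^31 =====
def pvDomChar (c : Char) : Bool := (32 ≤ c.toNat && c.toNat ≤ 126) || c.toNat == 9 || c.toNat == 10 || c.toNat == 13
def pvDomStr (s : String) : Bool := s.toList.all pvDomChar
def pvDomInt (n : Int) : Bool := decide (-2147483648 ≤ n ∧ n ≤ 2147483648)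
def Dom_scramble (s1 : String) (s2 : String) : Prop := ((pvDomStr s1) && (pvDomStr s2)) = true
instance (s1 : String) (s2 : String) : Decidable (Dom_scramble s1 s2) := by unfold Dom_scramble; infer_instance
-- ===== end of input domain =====

-- B replaces A's repeated .count scans with a character-count dictionary of s1.lower()
-- built once and decremented along s2.lower(): objective faster (two linear passes).


-- ===== PORT A =====
-- 'for i in s2: if s2.count(i) <= s1.count(i): pass else: return False'; iterating a
-- Python string yields single characters, for which str.count equals the char count.
def scrambleLoopA (s1l s2l : List Char) : List Char → Bool
  | [] => true
  | c :: rest => if s2l.count c ≤ s1l.count c then scrambleLoopA s1l s2l rest else false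

def scramble (s1 : String) (s2 : String) : Bool :=
  let s1l := (PySem.Str.lower s1).toList
  let s2l := (PySem.Str.lower s2).toList
  scrambleLoopA s1l s2l s2l

-- ===== PORT B =====
-- 'counts[c] = counts.get(c, 0) + 1' over s1.lower()
def scrambleCount (s1l : List Char) : PySem.Dict Char Int :=
  s1l.foldl (fun d c => d.insert c (d.getD c 0 + 1)) PySem.Dict.empty

-- 'n = counts.get(c, 0); if n == 0: return False; counts[c] = n - 1' over s2.lower()
def scrambleLoopB : List Char → PySem.Dict Char Int → Bool
  | [], _ => true
  | c :: rest, d =>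
      let n := d.getD c 0
      if n == 0 then false else scrambleLoopB rest (d.insert c (n - 1))

def scramble_alt (s1 : String) (s2 : String) : Bool :=
  scrambleLoopB (PySem.Str.lower s2).toList (scrambleCount (PySem.Str.lower s1).toList)

-- ===== PRECONDITION & SPEC =====
def Spec_scramble (s1 : String) (s2 : String) (out : Bool) : Prop := out = scramble_alt s1 s2
instance (s1 : String) (s2 : String) (out : Bool) : Decidable (Spec_scramble s1 s2 out) := by unfold Spec_scramble; infer_instance

-- ===== CLAIM (what is proved, stated in full; the proofs are below) =====
def Claim_equal_scramble : Prop := ∀ (s1 : String) (s2 : String), Dom_scramble s1 s2 → Spec_scramble s1 s2 (scramble s1 s2)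

-- ===== LEMMAS AND PROOFS =====

theorem scrambleLoopA_true_iff (s1l s2l l : List Char) :
    scrambleLoopA s1l s2l l = true ↔ ∀ c ∈ l, s2l.count c ≤ s1l.count c := by
  induction l with
  | nil => simp [scrambleLoopA]
  | cons c rest ih =>
      simp only [scrambleLoopA]
      split_ifs with h
      · simp [ih, h]
      · simp [h]

theorem scrambleCount_getD (s1l : List Char) (c : Char) :
    (scrambleCount s1l).getD c 0 = (s1l.count c : Int) := by
  simp [scrambleCount, PySem.Dict.getD_foldl_insert_add_one]

theorem scrambleLoopB_true_iff (l : List Char) (d : PySem.Dict Char Int)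
    (hpos : ∀ c, 0 ≤ d.getD c 0) :
    scrambleLoopB l d = true ↔ ∀ c, (l.count c : Int) ≤ d.getD c 0 := by
  induction l generalizing d with
  | nil => simpa [scrambleLoopB] using hpos
  | cons c rest ih =>
      simp only [scrambleLoopB]
      split_ifs with h
      · simp only [beq_iff_eq] at h
        constructor
        · intro hfalse; exact absurd hfalse (by simp)
        · intro hall
          have := hall c
          simp [List.count_cons_self] at this
          omega
      · simp only [beq_iff_eq] at h
        have hc : 0 < d.getD c 0 := lt_of_le_of_ne (hpos c) (Ne.symm h)
        have hpos' : ∀ x, 0 ≤ (d.insert c (d.getD c 0 - 1)).getD x 0 := by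
          intro x
          rw [PySem.Dict.getD_insert]
          split_ifs with hx
          · omega
          · exact hpos x
        rw [ih _ hpos']
        have key : ∀ x, (((rest.count x : Int) ≤ (d.insert c (d.getD c 0 - 1)).getD x 0) ↔
            (((c :: rest).count x : Int) ≤ d.getD x 0)) := by
          intro x
          rw [PySem.Dict.getD_insert]
          rcases eq_or_ne x c with hx | hx
          · subst hx
            rw [if_pos rfl, List.count_cons_self]
            push_cast
            omega
          · rw [if_neg hx]
            simp [List.count_cons, Ne.symm hx]
        exact ⟨fun hall x => (key x).mp (hall x), fun hall x => (key x).mpr (hall x)⟩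

-- ===== VERDICT (by name: the statement is the Claim_ definition above) =====
theorem scramble_spec : Claim_equal_scramble := by
  intro s1 s2 _
  unfold Spec_scramble scramble scramble_alt
  set s1l := (PySem.Str.lower s1).toList
  set s2l := (PySem.Str.lower s2).toList
  have hB := scrambleLoopB_true_iff s2l (scrambleCount s1l)
    (fun c => by rw [scrambleCount_getD]; exact_mod_cast Nat.zero_le _)
  have hiff : scrambleLoopA s1l s2l s2l = true ↔
      scrambleLoopB s2l (scrambleCount s1l) = true := by
    rw [scrambleLoopA_true_iff, hB]
    constructor
    · intro hall c
      rw [scrambleCount_getD]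
      by_cases hc : c ∈ s2l
      · exact_mod_cast hall c hc
      · simp [List.count_eq_zero_of_not_mem hc]
    · intro hall c hc
      have := hall c
      rw [scrambleCount_getD] at this
      exact_mod_cast this
  exact Bool.coe_iff_coe.mp hiff
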